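-- pv_equiv track=rewrite | github.com/ahosk/ml2_smu | Homeworks/Allen_Hoskins_HW1.py | create_dict_len_2_and_3
-- ===== SOURCE A (Python) =====
-- from collections import Counter
--
-- def create_dict_len_2_and_3(full_list):
--     flower_values_dict = dict(Counter(full_list))
--     len_2_flowers =  {}
--     len_3_flowers = {}
--     for k,v in flower_values_dict.items():
--         if len(k) == 3:
--             len_2_flowers.update({k:v})
--         elif len(k) == 5:
--             len_3_flowers.update({k:v})
--     return (len_2_flowers,len_3_flowers)
-- ===== SOURCE B (Python) =====
-- def create_dict_len_2_and_3(full_list):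
--     def tally(n):
--         d = {}
--         for item in full_list:
--             if len(item) == n:
--                 d[item] = d.get(item, 0) + 1
--         return d
--     return (tally(3), tally(5))
-- ===== Notes on version B (the rewrite author's own statement) =====
-- stated objective: alternative
-- what changed: Replaces the Counter-then-split-unique-keys pipeline by a staged helper: one dedicated counting pass per target key length (called for 3 and for 5), each building its dict directly with get-based increments, so no shared counter and no key-splitting loop exist.
import Mathlib
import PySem

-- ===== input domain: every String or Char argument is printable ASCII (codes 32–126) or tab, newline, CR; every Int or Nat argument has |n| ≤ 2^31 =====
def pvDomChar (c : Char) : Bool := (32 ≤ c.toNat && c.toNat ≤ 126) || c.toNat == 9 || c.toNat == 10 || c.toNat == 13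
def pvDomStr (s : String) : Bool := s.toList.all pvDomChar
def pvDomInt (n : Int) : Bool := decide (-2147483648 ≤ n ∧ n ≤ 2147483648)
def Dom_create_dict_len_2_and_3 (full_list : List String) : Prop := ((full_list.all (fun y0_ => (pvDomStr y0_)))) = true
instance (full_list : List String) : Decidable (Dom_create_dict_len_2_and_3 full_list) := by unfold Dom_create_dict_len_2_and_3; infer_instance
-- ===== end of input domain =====

-- B replaces A's Counter-then-split pipeline by a staged helper: one dedicated counting pass
-- per target key length (called for 3 and for 5), each building its dict directly with
-- get-based increments ("alternative": different decomposition, not claimed faster).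

-- ===== PORT A =====
-- flower_values_dict = dict(Counter(full_list)); then for k,v in items: route by len(k) via dict.update
def create_dict_len_2_and_3 (full_list : List String) : (List (String × Int)) × (List (String × Int)) :=
  let flower_values_dict : PySem.Dict String Int := PySem.Dict.counter full_list
  let st :=
    flower_values_dict.items.foldl
      (fun (st : PySem.Dict String Int × PySem.Dict String Int) kv =>
        if PySem.Str.len kv.1 = 3 then (st.1.update [kv], st.2)
        else if PySem.Str.len kv.1 = 5 then (st.1, st.2.update [kv])
        else st)
      (PySem.Dict.empty, PySem.Dict.empty)
  (st.1.items, st.2.items)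

-- ===== PORT B =====
-- def tally(n): d = {}; for item in full_list: if len(item) == n: d[item] = d.get(item, 0) + 1; return d
def pvTallyB (full_list : List String) (n : Int) : List (String × Int) :=
  (full_list.foldl
      (fun (d : PySem.Dict String Int) item =>
        if PySem.Str.len item = n then d.insert item (d.getD item 0 + 1) else d)
      PySem.Dict.empty).items

-- return (tally(3), tally(5))
def create_dict_len_2_and_3_alt (full_list : List String) : (List (String × Int)) × (List (String × Int)) :=
  (pvTallyB full_list 3, pvTallyB full_list 5)

-- ===== PRECONDITION & SPEC =====
def Spec_create_dict_len_2_and_3 (full_list : List String) (out : (List (String × Int)) × (List (String × Int))) : Prop := out = create_dict_len_2_and_3_alt full_list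
instance (full_list : List String) (out : (List (String × Int)) × (List (String × Int))) : Decidable (Spec_create_dict_len_2_and_3 full_list out) := by unfold Spec_create_dict_len_2_and_3; infer_instance

-- ===== CLAIM =====
def Claim_equal_create_dict_len_2_and_3 : Prop := ∀ (full_list : List String), Dom_create_dict_len_2_and_3 full_list → Spec_create_dict_len_2_and_3 full_list (create_dict_len_2_and_3 full_list)

-- ===== LEMMAS AND PROOFS =====

-- A's routing loop over pairs with fresh, pairwise-distinct keys appends each pair to the dict its key-length selects.
lemma routeA (L : List (String × Int)) (d2 d3 : PySem.Dict String Int)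
    (hnd : (L.map Prod.fst).Nodup)
    (h2 : ∀ p ∈ L, d2.contains p.1 = false) (h3 : ∀ p ∈ L, d3.contains p.1 = false) :
    L.foldl
      (fun (st : PySem.Dict String Int × PySem.Dict String Int) kv =>
        if PySem.Str.len kv.1 = 3 then (st.1.update [kv], st.2)
        else if PySem.Str.len kv.1 = 5 then (st.1, st.2.update [kv])
        else st) (d2, d3)
    = (PySem.Dict.mk (d2.items ++ L.filter (fun p => decide (PySem.Str.len p.1 = 3))),
       PySem.Dict.mk (d3.items ++ L.filter (fun p => decide (PySem.Str.len p.1 = 5)))) := by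
  induction L generalizing d2 d3 with
  | nil => simp
  | cons kv L ih =>
    simp only [List.map_cons, List.nodup_cons] at hnd
    have hk : kv.1 ∉ L.map Prod.fst := hnd.1
    simp only [List.foldl_cons, List.filter_cons]
    have fresh2 := h2 kv (by simp)
    have fresh3 := h3 kv (by simp)
    have hne : ∀ p ∈ L, p.1 ≠ kv.1 := by
      intro p hp h; exact hk (h ▸ List.mem_map_of_mem hp)
    by_cases h3' : PySem.Str.len kv.1 = 3
    · rw [if_pos h3']
      have hupd : d2.update [kv] = d2.insert kv.1 kv.2 := by
        simp [PySem.Dict.update]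
      rw [hupd, ih _ _ hnd.2
        (fun p hp => by
          rw [PySem.Dict.contains_insert]
          simp [hne p hp, h2 p (List.mem_cons_of_mem _ hp)])
        (fun p hp => h3 p (List.mem_cons_of_mem _ hp))]
      rw [PySem.Dict.items_insert_of_not_contains d2 kv.2 fresh2]
      rw [PySem.Str.len_eq] at h3'
      simp only [String.length_toList] at h3'
      simp
      exact ⟨h3', by omega⟩
    · rw [if_neg h3']
      by_cases h5' : PySem.Str.len kv.1 = 5
      · rw [if_pos h5']
        have hupd : d3.update [kv] = d3.insert kv.1 kv.2 := by
          simp [PySem.Dict.update]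
        rw [hupd, ih _ _ hnd.2
          (fun p hp => h2 p (List.mem_cons_of_mem _ hp))
          (fun p hp => by
            rw [PySem.Dict.contains_insert]
            simp [hne p hp, h3 p (List.mem_cons_of_mem _ hp)])]
        rw [PySem.Dict.items_insert_of_not_contains d3 kv.2 fresh3]
        rw [PySem.Str.len_eq] at h5'
        simp only [String.length_toList] at h5'
        simp
        exact ⟨by omega, h5'⟩
      · rw [if_neg h5',
          ih _ _ hnd.2 (fun p hp => h2 p (List.mem_cons_of_mem _ hp))
            (fun p hp => h3 p (List.mem_cons_of_mem _ hp))]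
        rw [if_neg (by simpa using h3'), if_neg (by simpa using h5')]

lemma ofList_filter (p : String → Bool) (xs : List String) :
    PySem.Set.ofList (xs.filter p) = (PySem.Set.ofList xs).filter p := by
  induction xs using List.reverseRecOn with
  | nil => simp
  | append_singleton t x ih =>
    by_cases px : p x = true <;> by_cases hx : x ∈ PySem.Set.ofList t <;>
      simp_all [List.filter_append, PySem.Set.ofList_append_singleton, List.mem_filter]

-- each split component of A equals the corresponding filtered counter, as assoc lists
lemma split_eq (p : String → Bool) (xs : List String) :
    ((PySem.Dict.counter xs).items.filter (fun q => p q.1))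
    = (PySem.Dict.counter (xs.filter p)).items := by
  rw [PySem.Dict.items_counter, PySem.Dict.items_counter, List.filter_map, ofList_filter]
  refine List.map_congr_left (fun k hk => ?_)
  have hpk : p k = true := (List.mem_filter.mp hk).2
  rw [List.count_filter hpk]

-- B's guarded counting loop is the plain counting loop over the filtered sublist.
lemma tallyB_filter (p : String → Bool) (xs : List String) (d : PySem.Dict String Int) :
    xs.foldl
      (fun (d : PySem.Dict String Int) item =>
        if p item = true then d.insert item (d.getD item 0 + 1) else d) d
    = (xs.filter p).foldl
        (fun (d : PySem.Dict String Int) item => d.insert item (d.getD item 0 + 1)) d := by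
  induction xs generalizing d with
  | nil => rfl
  | cons x t ih => by_cases px : p x = true <;> simp_all

-- one component of B equals the corresponding component of A
lemma comp_eq (xs : List String) (n : Int) :
    (PySem.Dict.mk
      ((PySem.Dict.counter xs).items.filter (fun p => decide (PySem.Str.len p.1 = n)))).items
    = pvTallyB xs n := by
  have hmk : ∀ L : List (String × Int), (PySem.Dict.mk L).items = L := fun _ => rfl
  rw [hmk, split_eq (fun k => decide (PySem.Str.len k = n)) xs]
  unfold pvTallyB
  have hguard :
      (fun (d : PySem.Dict String Int) item =>
        if PySem.Str.len item = n then d.insert item (d.getD item 0 + 1) else d)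
      = (fun (d : PySem.Dict String Int) item =>
        if (decide (PySem.Str.len item = n)) = true then d.insert item (d.getD item 0 + 1) else d) := by
    funext d item; simp
  rw [hguard, tallyB_filter, PySem.Dict.foldl_insert_getD_add_one_eq_counter]

-- ===== VERDICT =====
theorem create_dict_len_2_and_3_spec : Claim_equal_create_dict_len_2_and_3 := by
  intro xs _
  unfold Spec_create_dict_len_2_and_3 create_dict_len_2_and_3 create_dict_len_2_and_3_alt
  simp only []
  rw [routeA _ _ _
      (by rw [show ((PySem.Dict.counter xs).items.map Prod.fst) = (PySem.Dict.counter xs).keys from rfl,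
            PySem.Dict.keys_counter]; exact PySem.Set.nodup_ofList xs)
      (fun p _ => PySem.Dict.contains_empty p.1) (fun p _ => PySem.Dict.contains_empty p.1)]
  refine Prod.ext ?_ ?_
  · simpa using comp_eq xs 3
  · simpa using comp_eq xs 5
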